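-- pv_equiv track=rewrite | github.com/wiauxb/LEPL1401-Exercices | Examens Solutions/correction_exam_juin_2019.py | oxo
-- ===== SOURCE A (Python) =====
-- def oxo(g):
--     ver = 0
--     hor = 0
--     mdia = 0
--     ddia = 0
--     lv = len(g)
--     lh = len(g[0])
--
--     if lv < 3 and lh < 3:
--         return "aucune combinaison, matrice trop petite"
--
--     # ligne
--     for i in g:
--         for j in range(lh - 2):
--             if i[j] + i[j + 1] + i[j + 2] == "OXO":
--                 hor += 1
--     # colonne
--     for k in range(lh):
--         for l in range(lv - 2):
--             if g[l][k] + g[l + 1][k] + g[l + 2][k] == "OXO":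
--                 ver += 1
--
--     # diagonale montante
--     for m in range(2, lv):
--         for n in range(lh - 2):
--             if g[m][n] + g[m - 1][n + 1] + g[m - 2][n + 2] == "OXO":
--                 mdia += 1
--
--     # diagonale descendante
--     for o in range(lv - 2):
--         for p in range(lh - 2):
--             if g[o][p] + g[o + 1][p + 1] + g[o + 2][p + 2] == "OXO":
--                 ddia += 1
--
--     return (ver, hor, ddia, mdia)
-- ===== SOURCE B (Python) =====
-- def oxo(g):
--     lv = len(g)
--     lh = len(g[0])
--     if lv < 3 and lh < 3:
--         return "aucune combinaison, matrice trop petite"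
--     # index-free sliding windows: normalise the grid to width lh once, then count
--     # "OXO" windows by zipping each line with its own shifts (no index arithmetic).
--     G = [row[:lh] for row in g]
--
--     def win(xs, ys, zs):
--         return sum(a + b + c == "OXO" for a, b, c in zip(xs, ys, zs))
--
--     hor = sum(win(r, r[1:], r[2:]) for r in G)
--     ver = 0
--     ddia = 0
--     mdia = 0
--     for r0, r1, r2 in zip(G, G[1:], G[2:]):
--         ver += win(r0, r1, r2)
--         ddia += win(r0, r1[1:], r2[2:])
--         mdia += win(r2, r1[1:], r0[2:])
--     return (ver, hor, ddia, mdia)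
-- ===== Notes on version B (the rewrite author's own statement) =====
-- stated objective: alternative
-- what changed: A runs four separate nested index loops with per-direction range bounds; B normalises the grid to width lh once, then counts each direction index-free as sliding windows obtained by zipping lines (and the grid) with their own shifted copies.
import Mathlib
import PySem

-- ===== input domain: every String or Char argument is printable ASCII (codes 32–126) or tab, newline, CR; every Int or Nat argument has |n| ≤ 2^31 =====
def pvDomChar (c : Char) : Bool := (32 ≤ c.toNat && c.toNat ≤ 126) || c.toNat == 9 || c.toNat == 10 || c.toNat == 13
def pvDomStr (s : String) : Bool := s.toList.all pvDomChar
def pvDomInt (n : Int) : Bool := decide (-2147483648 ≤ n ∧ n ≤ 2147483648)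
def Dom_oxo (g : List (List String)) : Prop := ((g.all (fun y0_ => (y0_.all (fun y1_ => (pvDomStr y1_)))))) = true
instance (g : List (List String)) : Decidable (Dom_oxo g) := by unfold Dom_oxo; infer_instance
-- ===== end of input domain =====

-- B replaces A's four nested index loops by an index-free formulation: the grid is
-- normalised to width lh once, and every direction is counted as sliding windows obtained
-- by zipping lines (and the grid) with their own shifted copies (objective: alternative).

-- g[i][j] with Python defaults ("" / []) — in range whenever Pre_oxo holds
def cell (g : List (List String)) (i j : Int) : String :=
  PySem.List.pyGetD (PySem.List.pyGetD g i []) j ""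

-- ===== PORT A =====
def oxo (g : List (List String)) : Int × Int × Int × Int :=
  let ver : Int := 0
  let hor : Int := 0
  let mdia : Int := 0
  let ddia : Int := 0
  let lv : Int := PySem.List.len g
  let lh : Int := PySem.List.len (PySem.List.pyGetD g 0 [])   -- len(g[0]); g = [] raises, excluded by Pre_oxo
  if lv < 3 ∧ lh < 3 then (0, 0, 0, 0) else   -- Python returns a string here (not an int tuple); excluded by Pre_oxo
  -- ligne
  let hor := g.foldl (fun acc i =>
    (PySem.List.pyRange 0 (lh - 2) 1).foldl (fun acc j =>
      if PySem.List.pyGetD i j "" ++ PySem.List.pyGetD i (j + 1) "" ++ PySem.List.pyGetD i (j + 2) "" == "OXO"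
      then acc + 1 else acc) acc) hor
  -- colonne
  let ver := (PySem.List.pyRange 0 lh 1).foldl (fun acc k =>
    (PySem.List.pyRange 0 (lv - 2) 1).foldl (fun acc l =>
      if cell g l k ++ cell g (l + 1) k ++ cell g (l + 2) k == "OXO"
      then acc + 1 else acc) acc) ver
  -- diagonale montante
  let mdia := (PySem.List.pyRange 2 lv 1).foldl (fun acc m =>
    (PySem.List.pyRange 0 (lh - 2) 1).foldl (fun acc n =>
      if cell g m n ++ cell g (m - 1) (n + 1) ++ cell g (m - 2) (n + 2) == "OXO"
      then acc + 1 else acc) acc) mdia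
  -- diagonale descendante
  let ddia := (PySem.List.pyRange 0 (lv - 2) 1).foldl (fun acc o =>
    (PySem.List.pyRange 0 (lh - 2) 1).foldl (fun acc p =>
      if cell g o p ++ cell g (o + 1) (p + 1) ++ cell g (o + 2) (p + 2) == "OXO"
      then acc + 1 else acc) acc) ddia
  (ver, hor, ddia, mdia)

-- ===== PORT B =====
-- win(xs, ys, zs) = sum(a+b+c == "OXO" for a,b,c in zip(xs, ys, zs))
def win (xs ys zs : List String) : Int :=
  (xs.zip (ys.zip zs)).foldl (fun acc t =>
    if t.1 ++ t.2.1 ++ t.2.2 == "OXO" then acc + 1 else acc) 0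

def oxo_alt (g : List (List String)) : Int × Int × Int × Int :=
  let lv : Int := PySem.List.len g
  let lh : Int := PySem.List.len (PySem.List.pyGetD g 0 [])
  if lv < 3 ∧ lh < 3 then (0, 0, 0, 0) else   -- Python returns a string here; excluded by Pre_oxo
  let G := g.map (fun row => PySem.List.slice row none (some lh))       -- [row[:lh] for row in g]
  let hor := (G.map (fun r =>
    win r (PySem.List.slice r (some 1) none) (PySem.List.slice r (some 2) none))).sum
  let s := (G.zip ((PySem.List.slice G (some 1) none).zip (PySem.List.slice G (some 2) none))).foldl
    (fun s t =>
      (s.1 + win t.1 t.2.1 t.2.2,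
       s.2.1 + win t.1 (PySem.List.slice t.2.1 (some 1) none) (PySem.List.slice t.2.2 (some 2) none),
       s.2.2 + win t.2.2 (PySem.List.slice t.2.1 (some 1) none) (PySem.List.slice t.1 (some 2) none)))
    ((0, 0, 0) : Int × Int × Int)
  (s.1, hor, s.2.1, s.2.2)

-- ===== PRECONDITION & SPEC =====
-- Pre_oxo is exactly where the Python A returns an int tuple: g nonempty and every row at least as
-- long as row 0 (otherwise IndexError), and not (both dimensions < 3), where A returns a French
-- string instead of a tuple (a value outside the declared return type).
def Pre_oxo (g : List (List String)) : Prop :=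
  g ≠ [] ∧ (∀ row ∈ g, (g.headD []).length ≤ row.length) ∧
    ¬((g.length : Int) < 3 ∧ ((g.headD []).length : Int) < 3)
instance (g : List (List String)) : Decidable (Pre_oxo g) := by unfold Pre_oxo; infer_instance

def pvWitness_oxo : List (List String) :=
  [["O", "X", "O"], ["X", "X", "X"], ["O", "X", "O"]]

def Spec_oxo (g : List (List String)) (out : Int × Int × Int × Int) : Prop := out = oxo_alt g
instance (g : List (List String)) (out : Int × Int × Int × Int) : Decidable (Spec_oxo g out) := by unfold Spec_oxo; infer_instance

-- ===== CLAIM (what is proved, stated in full; the proofs are below) =====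
def Claim_equal_oxo : Prop := ∀ (g : List (List String)), Dom_oxo g → Pre_oxo g → Spec_oxo g (oxo g)

-- ===== LEMMAS AND PROOFS =====

-- ===== VERDICT (by name: the statement is the Claim_ definition above) =====
-- a loop updating three independent counters is three sums
lemma trip_outer {α : Type} (l : List α) (f1 f2 f3 : α → Int) (s : Int × Int × Int) :
    l.foldl (fun s x => (s.1 + f1 x, s.2.1 + f2 x, s.2.2 + f3 x)) s
    = (s.1 + (l.map f1).sum, s.2.1 + (l.map f2).sum, s.2.2 + (l.map f3).sum) := by
  induction l generalizing s with
  | nil => simp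
  | cons x xs ih =>
    obtain ⟨a, b, c⟩ := s
    simp only [List.foldl_cons, ih, List.map_cons, List.sum_cons]
    refine Prod.ext ?_ (Prod.ext ?_ ?_) <;> simp <;> ring

-- a zip of three lists enumerated by index
lemma zip3_eq_map_range {α : Type} (d : α) (xs ys zs : List α) :
    xs.zip (ys.zip zs) = (List.range (min xs.length (min ys.length zs.length))).map
      (fun j => (xs.getD j d, ys.getD j d, zs.getD j d)) := by
  apply List.ext_getElem
  · simp
  · intro i h1 h2
    simp only [List.length_zip] at h1
    rw [List.getElem_map, List.getElem_range, List.getElem_zip, List.getElem_zip,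
      List.getD_eq_getElem xs d (by omega), List.getD_eq_getElem ys d (by omega),
      List.getD_eq_getElem zs d (by omega)]

-- B's window counter, as a count over indices
lemma win_eq (xs ys zs : List String) :
    win xs ys zs = ((List.range (min xs.length (min ys.length zs.length))).countP
      (fun j => xs.getD j "" ++ ys.getD j "" ++ zs.getD j "" == "OXO") : Int) := by
  unfold win
  rw [PySem.List.foldl_if_add_one, zero_add, zip3_eq_map_range "", List.countP_map]
  rfl

-- a count over range(0, b) with integer indices is a count over Nat indices
lemma countP_pyRange_zero (b : Int) (p : Int → Bool) :
    (PySem.List.pyRange 0 b 1).countP p = List.countP (fun k : Nat => p (k : Int)) (List.range b.toNat) := by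
  rw [PySem.List.pyRange_one, List.countP_map]
  have : b - 0 = b := by omega
  rw [this]
  apply List.countP_congr
  intro k _
  simp [Function.comp]

-- a sum over range(a, b) with integer indices is a sum over Nat indices
lemma sum_pyRange (a b : Int) (f : Int → Int) :
    ((PySem.List.pyRange a b 1).map f).sum
    = (List.map (fun k : Nat => f (a + (k : Int))) (List.range (b - a).toNat)).sum := by
  rw [PySem.List.pyRange_one, List.map_map]
  rfl

-- swapping the two directions of a double count (A scans columns outer, B scans rows outer)
lemma sum_countP_comm (R1 R2 : List Nat) (q : Nat → Nat → Bool) :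
    ((R1.map (fun i => ((R2.countP (fun j => q i j)) : Int))).sum)
    = ((R2.map (fun j => ((R1.countP (fun i => q i j)) : Int))).sum) := by
  induction R1 with
  | nil => simp
  | cons x xs ih =>
    simp only [List.map_cons, List.sum_cons, List.countP_cons, ih]
    have hmap : (R2.map (fun j => ((List.countP (fun i => q i j) xs + if q x j = true then 1 else 0 : Nat) : Int)))
        = R2.map (fun j => ((List.countP (fun i => q i j) xs : Nat) : Int) + (if q x j = true then (1 : Int) else 0)) := by
      apply List.map_congr_left
      intro j _
      push_cast
      ring
    rw [hmap, PySem.List.sum_map_add_int, PySem.List.sum_map_ite_one_zero, add_comm]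

-- truncated-row access is plain access (B reads the width-lh grid, A the original rows)
lemma acc_take (row : List String) (n k j : Nat) (hn : n ≤ row.length) (hj : k + j < n) :
    ((row.take n).drop k).getD j "" = row.getD (k + j) "" := by
  rw [List.getD_eq_getElem _ "" (by simp; omega), List.getD_eq_getElem _ "" (by omega),
    List.getElem_drop, List.getElem_take]

lemma acc_take0 (row : List String) (n j : Nat) (hn : n ≤ row.length) (hj : j < n) :
    (row.take n).getD j "" = row.getD j "" := by
  have := acc_take row n 0 j hn (by omega)
  simpa using this

-- element of a dropped list
lemma getD_drop' {α : Type} (d : α) (xs : List α) (k l : Nat) (h : k + l < xs.length) :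
    (xs.drop k).getD l d = xs.getD (k + l) d := by
  rw [List.getD_eq_getElem _ d (by simp; omega), List.getD_eq_getElem _ d (by omega), List.getElem_drop]

-- element of the truncated grid
lemma getD_map_take (g : List (List String)) (lh l : Nat) (h : l < g.length) :
    (g.map (fun row => row.take lh)).getD l [] = (g.getD l []).take lh := by
  rw [List.getD_eq_getElem _ [] (by simp; omega), List.getD_eq_getElem _ [] (by omega), List.getElem_map]

-- the generic shifted-window count B uses, as a count over Nat indices into the raw rows
lemma win_take (r1 r2 r3 : List String) (lh a b : Nat)
    (h1 : lh ≤ r1.length) (h2 : lh ≤ r2.length) (h3 : lh ≤ r3.length) :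
    win (r1.take lh) ((r2.take lh).drop a) ((r3.take lh).drop b)
    = ((List.range (lh - max a b)).countP
        (fun j => r1.getD j "" ++ r2.getD (a + j) "" ++ r3.getD (b + j) "" == "OXO") : Int) := by
  rw [win_eq]
  have hlen : min (r1.take lh).length (min ((r2.take lh).drop a).length ((r3.take lh).drop b).length)
      = lh - max a b := by
    simp only [List.length_drop, List.length_take]
    omega
  rw [hlen]
  norm_cast
  apply List.countP_congr
  intro j hj
  rw [List.mem_range] at hj
  rw [acc_take0 r1 lh j h1 (by omega), acc_take r2 lh a j h2 (by omega),
    acc_take r3 lh b j h3 (by omega)]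

lemma cell_eq (g : List (List String)) (l k : Nat) :
    cell g (l : Int) (k : Int) = (g.getD l []).getD k "" := by
  simp [cell, PySem.List.pyGetD_natCast]

-- cell with an index given as any Int expression equal to a Nat cast
lemma cell_cast (g : List (List String)) (a b : Int) (l k : Nat)
    (ha : a = (l : Int)) (hb : b = (k : Int)) : cell g a b = (g.getD l []).getD k "" := by
  subst ha; subst hb; exact cell_eq g l k

lemma pyg_cast (row : List String) (a : Int) (j : Nat) (ha : a = (j : Int)) :
    PySem.List.pyGetD row a "" = row.getD j "" := by
  subst ha; exact PySem.List.pyGetD_natCast row j ""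

-- the unshifted (vertical) window count
lemma win_take_ver (r1 r2 r3 : List String) (lh : Nat)
    (h1 : lh ≤ r1.length) (h2 : lh ≤ r2.length) (h3 : lh ≤ r3.length) :
    win (r1.take lh) (r2.take lh) (r3.take lh)
    = ((List.range lh).countP
        (fun j => r1.getD j "" ++ r2.getD j "" ++ r3.getD j "" == "OXO") : Int) := by
  have h := win_take r1 r2 r3 lh 0 0 h1 h2 h3
  simpa using h

-- ===== VERDICT (by name: the statement is the Claim_ definition above) =====
theorem oxo_spec : Claim_equal_oxo := by
  intro g _ hPre
  obtain ⟨hne, hrows, hbig⟩ := hPre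
  have h0 : PySem.List.pyGetD g 0 [] = g.headD [] := by
    cases g with
    | nil => exact absurd rfl hne
    | cons a t => simp [PySem.List.pyGetD, PySem.List.pyGet?, PySem.List.pyIdx?]
  unfold Spec_oxo oxo oxo_alt
  dsimp only
  simp only [h0, PySem.List.len_eq]
  rw [if_neg hbig, if_neg hbig]
  have hs1 : ∀ {α : Type} (r : List α), PySem.List.slice r (some 1) none = r.drop 1 := by
    intro α r
    rw [PySem.List.slice_from (a := 1) r (by norm_num)]
    rfl
  have hs2 : ∀ {α : Type} (r : List α), PySem.List.slice r (some 2) none = r.drop 2 := by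
    intro α r
    rw [PySem.List.slice_from (a := 2) r (by norm_num)]
    rfl
  simp only [hs1, hs2, PySem.List.slice_to_natCast]
  rw [zip3_eq_map_range ([] : List String), trip_outer]
  simp only [List.map_map, List.length_map, List.length_drop, zero_add]
  simp only [PySem.List.foldl_if_add_one, PySem.List.foldl_add, zero_add]
  have hlrow : ∀ l, l < g.length → (g.headD []).length ≤ (g.getD l []).length := by
    intro l hl
    have hm : g.getD l [] ∈ g := by
      rw [List.getD_eq_getElem _ _ hl]
      exact List.getElem_mem hl
    exact hrows _ hm
  have hmin : min g.length (min (g.length - 1) (g.length - 2)) = g.length - 2 := by omega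
  have htv : ((g.length : Int) - 2).toNat = g.length - 2 := by omega
  have hth : (((g.headD []).length : Int) - 2).toNat = (g.headD []).length - 2 := by omega
  simp only [hmin]
  simp only [Prod.mk.injEq]
  refine ⟨?_, ?_, ?_, ?_⟩
  · -- ver: A scans columns outer; swap, then windows of three stacked rows
    rw [sum_pyRange]
    simp only [zero_add, Int.sub_zero, Int.toNat_natCast, countP_pyRange_zero, htv]
    rw [sum_countP_comm]
    refine congrArg List.sum (List.map_congr_left ?_)
    intro l hl
    rw [List.mem_range] at hl
    simp only [Function.comp_apply]
    rw [getD_drop' [] _ 1 l (by simp; omega), getD_drop' [] _ 2 l (by simp; omega),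
      getD_map_take g _ l (by omega), getD_map_take g _ (1 + l) (by omega),
      getD_map_take g _ (2 + l) (by omega),
      win_take_ver _ _ _ _ (hlrow l (by omega)) (hlrow (1 + l) (by omega)) (hlrow (2 + l) (by omega))]
    refine congrArg _ (List.countP_congr ?_)
    intro k hk
    rw [List.mem_range] at hk
    rw [cell_cast g _ _ l k rfl rfl, cell_cast g _ _ (1 + l) k (by push_cast; ring) rfl,
      cell_cast g _ _ (2 + l) k (by push_cast; ring) rfl]
  · -- hor: per row, A's index loop is B's window count on the truncated row
    refine congrArg List.sum (List.map_congr_left ?_)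
    intro row hrow
    simp only [Function.comp_apply]
    rw [win_take row row row _ 1 2 (hrows row hrow) (hrows row hrow) (hrows row hrow)]
    simp only [countP_pyRange_zero, hth, show max 1 2 = 2 from rfl]
    refine congrArg _ (List.countP_congr ?_)
    intro j hj
    rw [List.mem_range] at hj
    rw [pyg_cast row _ j rfl, pyg_cast row _ (1 + j) (by push_cast; ring),
      pyg_cast row _ (2 + j) (by push_cast; ring)]
  · -- ddia: descending windows of three stacked, shifted rows
    rw [sum_pyRange]
    simp only [zero_add, Int.sub_zero, htv]
    refine congrArg List.sum (List.map_congr_left ?_)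
    intro l hl
    rw [List.mem_range] at hl
    simp only [Function.comp_apply]
    rw [getD_drop' [] _ 1 l (by simp; omega), getD_drop' [] _ 2 l (by simp; omega),
      getD_map_take g _ l (by omega), getD_map_take g _ (1 + l) (by omega),
      getD_map_take g _ (2 + l) (by omega),
      win_take _ _ _ _ 1 2 (hlrow l (by omega)) (hlrow (1 + l) (by omega)) (hlrow (2 + l) (by omega))]
    simp only [countP_pyRange_zero, hth, show max 1 2 = 2 from rfl]
    refine congrArg _ (List.countP_congr ?_)
    intro j hj
    rw [List.mem_range] at hj
    rw [cell_cast g _ _ l j rfl rfl, cell_cast g _ _ (1 + l) (1 + j) (by push_cast; ring) (by push_cast; ring),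
      cell_cast g _ _ (2 + l) (2 + j) (by push_cast; ring) (by push_cast; ring)]
  · -- mdia: ascending windows, anchored by A at the bottom row m = l + 2
    rw [sum_pyRange]
    simp only [htv]
    refine congrArg List.sum (List.map_congr_left ?_)
    intro l hl
    rw [List.mem_range] at hl
    simp only [Function.comp_apply]
    rw [getD_drop' [] _ 1 l (by simp; omega), getD_drop' [] _ 2 l (by simp; omega),
      getD_map_take g _ l (by omega), getD_map_take g _ (1 + l) (by omega),
      getD_map_take g _ (2 + l) (by omega),
      win_take _ _ _ _ 1 2 (hlrow (2 + l) (by omega)) (hlrow (1 + l) (by omega)) (hlrow l (by omega))]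
    simp only [countP_pyRange_zero, hth, show max 1 2 = 2 from rfl]
    refine congrArg _ (List.countP_congr ?_)
    intro j hj
    rw [List.mem_range] at hj
    rw [cell_cast g _ _ (2 + l) j (by push_cast; ring) rfl,
      cell_cast g _ _ (1 + l) (1 + j) (by push_cast; ring) (by push_cast; ring),
      cell_cast g _ _ l (2 + j) (by ring) (by push_cast; ring)]
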